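-- pv_equiv track=rewrite | github.com/ferdousulhaque/problem-solving-bootcamp | assignment04/test.py | noOfEvenDaysInAYearOptimized
-- ===== SOURCE A (Python) =====
-- def noOfEvenDaysInAYearOptimized(yearsFrom, yearsTo):
--     evenDaysInAMonth = 0
--     years = (yearsTo - yearsFrom) + 1
--     # Optimized Solution O(n)
--     for day in range(1,31):
--         if(day % 2 == 0):
--             evenDaysInAMonth += 1
--     totalEvenDaysInAYear = evenDaysInAMonth * 12;
--     return totalEvenDaysInAYear * years
-- ===== SOURCE B (Python) =====
-- def noOfEvenDaysInAYearOptimized(yearsFrom, yearsTo):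
--     # closed form: 15 even days per 30-day month * 12 months = 180 per year
--     return 180 * ((yearsTo - yearsFrom) + 1)
-- ===== Notes on version B (the rewrite author's own statement) =====
-- stated objective: simpler
-- what changed: Replaced the per-day counting loop (counting even days 1..30, then *12, *years) with the direct closed form 180 * ((yearsTo - yearsFrom) + 1).
import Mathlib
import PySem

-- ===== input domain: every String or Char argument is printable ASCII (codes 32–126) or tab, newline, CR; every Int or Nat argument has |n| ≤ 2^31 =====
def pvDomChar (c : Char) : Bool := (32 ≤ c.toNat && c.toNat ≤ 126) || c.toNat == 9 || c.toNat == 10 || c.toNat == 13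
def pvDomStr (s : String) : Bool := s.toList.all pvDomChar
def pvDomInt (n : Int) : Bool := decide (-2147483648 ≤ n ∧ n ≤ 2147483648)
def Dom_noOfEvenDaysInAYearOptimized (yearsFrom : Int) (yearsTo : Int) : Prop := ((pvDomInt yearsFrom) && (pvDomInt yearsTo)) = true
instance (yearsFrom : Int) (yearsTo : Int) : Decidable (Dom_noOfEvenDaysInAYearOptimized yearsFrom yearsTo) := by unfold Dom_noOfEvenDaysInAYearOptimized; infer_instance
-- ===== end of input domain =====

-- ===== PORT A =====
-- B replaces A's per-day counting loop by the closed form 180 * years (simpler).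
def noOfEvenDaysInAYearOptimized (yearsFrom : Int) (yearsTo : Int) : Int :=
  let evenDaysInAMonth : Int := 0
  let years : Int := (yearsTo - yearsFrom) + 1
  let evenDaysInAMonth : Int :=
    (PySem.List.pyRange 1 31 1).foldl
      (fun acc day => if day % 2 == 0 then acc + 1 else acc) evenDaysInAMonth
  let totalEvenDaysInAYear : Int := evenDaysInAMonth * 12
  totalEvenDaysInAYear * years

-- ===== PORT B =====
def noOfEvenDaysInAYearOptimized_alt (yearsFrom : Int) (yearsTo : Int) : Int :=
  180 * ((yearsTo - yearsFrom) + 1)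

-- ===== PRECONDITION & SPEC =====
def Spec_noOfEvenDaysInAYearOptimized (yearsFrom : Int) (yearsTo : Int) (out : Int) : Prop := out = noOfEvenDaysInAYearOptimized_alt yearsFrom yearsTo
instance (yearsFrom : Int) (yearsTo : Int) (out : Int) : Decidable (Spec_noOfEvenDaysInAYearOptimized yearsFrom yearsTo out) := by unfold Spec_noOfEvenDaysInAYearOptimized; infer_instance

-- ===== CLAIM (what is proved, stated in full; the proofs are below) =====
def Claim_equal_noOfEvenDaysInAYearOptimized : Prop := ∀ (yearsFrom : Int) (yearsTo : Int), Dom_noOfEvenDaysInAYearOptimized yearsFrom yearsTo → Spec_noOfEvenDaysInAYearOptimized yearsFrom yearsTo (noOfEvenDaysInAYearOptimized yearsFrom yearsTo)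

-- ===== LEMMAS AND PROOFS =====

-- ===== VERDICT (by name: the statement is the Claim_ definition above) =====
theorem pvEvenCount_loop :
    (PySem.List.pyRange 1 31 1).foldl
      (fun acc day => if day % 2 == 0 then acc + 1 else acc) (0 : Int) = 15 := by
  decide

theorem noOfEvenDaysInAYearOptimized_spec : Claim_equal_noOfEvenDaysInAYearOptimized := by
  intro yearsFrom yearsTo _
  unfold Spec_noOfEvenDaysInAYearOptimized noOfEvenDaysInAYearOptimized noOfEvenDaysInAYearOptimized_alt
  dsimp only
  rw [pvEvenCount_loop]
  ring
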